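-- pv_equiv track=rewrite | github.com/KinnearM/Advent_2025 | day9WIP.py | is_is_green
-- ===== SOURCE A (Python) =====
-- def is_green(coord, vertical_limits, horizontal_limits):
--     x, y = coord
--
--     v_limit = vertical_limits.get(x)
--
--     if v_limit is not None:
--         v_min, v_max = v_limit
--         if v_min <= y <= v_max:
--             return True
--
--     h_limit = horizontal_limits.get(y)
--     if h_limit is not None:
--         h_min, h_max = h_limit
--         if h_min <= x <= h_max:
--             return True
--     return False
--
-- def is_is_green(coord,vertical_limits,horizontal_limits):
--   x, y = coord
--
--   max_x = max(vertical_limits.keys(), default=0)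
--   max_y = max(horizontal_limits.keys(), default=0)
--   min_x = min(vertical_limits.keys(), default=0)
--   min_y = min(horizontal_limits.keys(), default=0)
--
--   vert_line = [(x, p) for p in range(min_y,max_y + 1)]
--   hor_line = [(p, y) for p in range(min_x,max_x + 1)]
--
--   vertical_greens = []
--   horizontal_greens = []
--   for i in vert_line:
--     if is_green(i,vertical_limits,horizontal_limits):
--       vertical_greens.append(i)
--   if len(vertical_greens)>0:
--     min_vert=min(vertical_greens)
--     max_vert=max(vertical_greens)
--     if min_vert[1]<=y<=max_vert[1]:
--       return True
--   for i in hor_line: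
--     if is_green(i,vertical_limits,horizontal_limits):
--       horizontal_greens.append(i)
--   if len(horizontal_greens)>0:
--     min_hor=min(horizontal_greens)
--     max_hor=max(horizontal_greens)
--     if min_hor[0]<=x<=max_hor[0]:
--       return True
--   return False
-- ===== SOURCE B (Python) =====
-- def _clipped_span(limit, lo, hi):
--     # the span of a single limit entry clipped to [lo, hi], as its two endpoints
--     if limit is not None:
--         a = max(limit[0], lo)
--         b = min(limit[1], hi)
--         if a <= b:
--             return [a, b]
--     return []
--
--
-- def _covers(points, t):
--     return bool(points) and min(points) <= t <= max(points)
--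
--
-- def is_is_green(coord, vertical_limits, horizontal_limits):
--     x, y = coord
--
--     max_x = max(vertical_limits.keys(), default=0)
--     max_y = max(horizontal_limits.keys(), default=0)
--     min_x = min(vertical_limits.keys(), default=0)
--     min_y = min(horizontal_limits.keys(), default=0)
--
--     # Candidate green p values on the vertical line through x, within [min_y, max_y]:
--     # the clipped span of x's own vertical limit contributes its endpoints, and every
--     # horizontal limit whose span covers x contributes its row p.
--     ps = _clipped_span(vertical_limits.get(x), min_y, max_y)
--     for p, (a, b) in horizontal_limits.items():
--         if min_y <= p <= max_y and a <= x <= b: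
--             ps.append(p)
--     if _covers(ps, y):
--         return True
--
--     qs = _clipped_span(horizontal_limits.get(y), min_x, max_x)
--     for q, (a, b) in vertical_limits.items():
--         if min_x <= q <= max_x and a <= y <= b:
--             qs.append(q)
--     if _covers(qs, x):
--         return True
--     return False
-- ===== Notes on version B (the rewrite author's own statement) =====
-- stated objective: faster
-- what changed: Instead of scanning every coordinate of the full key bounding range and collecting green points, B computes the candidate green points directly from the clipped interval endpoints of the coordinate's own limit plus the qualifying dict entries, then applies the same min/max test.
import Mathlib
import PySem

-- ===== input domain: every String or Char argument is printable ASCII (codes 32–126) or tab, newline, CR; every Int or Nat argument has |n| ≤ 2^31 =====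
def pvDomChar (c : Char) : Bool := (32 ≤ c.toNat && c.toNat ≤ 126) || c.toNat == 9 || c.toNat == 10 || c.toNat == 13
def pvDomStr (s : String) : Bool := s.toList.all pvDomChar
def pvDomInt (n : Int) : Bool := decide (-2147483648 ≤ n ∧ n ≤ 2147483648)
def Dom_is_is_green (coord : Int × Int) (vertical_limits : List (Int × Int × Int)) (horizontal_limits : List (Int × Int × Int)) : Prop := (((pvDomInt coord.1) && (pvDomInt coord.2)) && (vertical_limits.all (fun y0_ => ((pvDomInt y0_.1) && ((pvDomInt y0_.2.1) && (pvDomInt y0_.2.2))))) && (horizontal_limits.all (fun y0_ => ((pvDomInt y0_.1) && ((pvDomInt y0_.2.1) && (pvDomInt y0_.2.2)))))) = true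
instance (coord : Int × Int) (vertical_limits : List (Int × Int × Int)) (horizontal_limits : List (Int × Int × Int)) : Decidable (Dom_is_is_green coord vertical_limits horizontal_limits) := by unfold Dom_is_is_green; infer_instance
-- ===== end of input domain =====

-- B replaces A's scan of every coordinate of the bounding range by a direct computation of the
-- candidate green points from the interval endpoints and the dict entries themselves (objective: faster).

-- ===== PORT A =====
-- Python's lexicographic `<` on 2-tuples of ints
def pvLexLt (a b : Int × Int) : Bool := a.1 < b.1 || (a.1 == b.1 && a.2 < b.2)

-- Python min/max over a nonempty list of pairs (first extremal element, like Python's min/max)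
def pvMinPair (h0 : Int × Int) (t : List (Int × Int)) : Int × Int :=
  t.foldl (fun m i => if pvLexLt i m then i else m) h0
def pvMaxPair (h0 : Int × Int) (t : List (Int × Int)) : Int × Int :=
  t.foldl (fun m i => if pvLexLt m i then i else m) h0

-- "if L: if min(L) <= t <= max(L): return True" on a list of pairs, reading coordinate `proj`
def pvSpanCheck (L : List (Int × Int)) (proj : Int × Int → Int) (t : Int) : Bool :=
  match L with
  | [] => false
  | g :: gs => decide (proj (pvMinPair g gs) ≤ t ∧ t ≤ proj (pvMaxPair g gs))

def is_green (coord : Int × Int) (vertical_limits horizontal_limits : PySem.Dict Int (Int × Int)) : Bool :=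
  let x := coord.1
  let y := coord.2
  let hpart : Bool :=
    match horizontal_limits.get? y with
    | some hl => decide (hl.1 ≤ x ∧ x ≤ hl.2)
    | none => false
  match vertical_limits.get? x with
  | some vl => if vl.1 ≤ y ∧ y ≤ vl.2 then true else hpart
  | none => hpart

def is_is_green (coord : Int × Int) (vertical_limits : List (Int × Int × Int)) (horizontal_limits : List (Int × Int × Int)) : Bool :=
  let vd := PySem.Dict.ofList vertical_limits
  let hd := PySem.Dict.ofList horizontal_limits
  let x := coord.1
  let y := coord.2
  let max_x := PySem.List.maxD vd.keys (fun k => k) 0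
  let max_y := PySem.List.maxD hd.keys (fun k => k) 0
  let min_x := PySem.List.minD vd.keys (fun k => k) 0
  let min_y := PySem.List.minD hd.keys (fun k => k) 0
  let vert_line := (PySem.List.pyRange min_y (max_y + 1)).map (fun p => (x, p))
  let hor_line := (PySem.List.pyRange min_x (max_x + 1)).map (fun p => (p, y))
  let vertical_greens := vert_line.foldl (fun acc i => if is_green i vd hd then acc ++ [i] else acc) []
  if pvSpanCheck vertical_greens (fun g => g.2) y then true
  else
    let horizontal_greens := hor_line.foldl (fun acc i => if is_green i vd hd then acc ++ [i] else acc) []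
    pvSpanCheck horizontal_greens (fun g => g.1) x

-- ===== PORT B =====
-- the clipped span of a vertical/horizontal limit, as its two endpoints (Source B's _clipped_span)
def pvClip (o : Option (Int × Int)) (lo hi : Int) : List Int :=
  match o with
  | some ab => if max ab.1 lo ≤ min ab.2 hi then [max ab.1 lo, min ab.2 hi] else []
  | none => []

-- "L and min(L) <= t <= max(L)" on a list of candidate points (Source B's final test)
def pvCond (L : List Int) (t : Int) : Bool :=
  match L with
  | [] => false
  | p :: r => decide (r.foldl min p ≤ t ∧ t ≤ r.foldl max p)

def is_is_green_alt (coord : Int × Int) (vertical_limits : List (Int × Int × Int)) (horizontal_limits : List (Int × Int × Int)) : Bool :=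
  let vd := PySem.Dict.ofList vertical_limits
  let hd := PySem.Dict.ofList horizontal_limits
  let x := coord.1
  let y := coord.2
  let max_x := PySem.List.maxD vd.keys (fun k => k) 0
  let max_y := PySem.List.maxD hd.keys (fun k => k) 0
  let min_x := PySem.List.minD vd.keys (fun k => k) 0
  let min_y := PySem.List.minD hd.keys (fun k => k) 0
  let ps0 := pvClip (vd.get? x) min_y max_y
  let ps := hd.items.foldl (fun acc it =>
      if decide (min_y ≤ it.1 ∧ it.1 ≤ max_y ∧ it.2.1 ≤ x ∧ x ≤ it.2.2) then acc ++ [it.1] else acc) ps0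
  if pvCond ps y then true
  else
    let qs0 := pvClip (hd.get? y) min_x max_x
    let qs := vd.items.foldl (fun acc it =>
        if decide (min_x ≤ it.1 ∧ it.1 ≤ max_x ∧ it.2.1 ≤ y ∧ y ≤ it.2.2) then acc ++ [it.1] else acc) qs0
    pvCond qs x

-- ===== PRECONDITION & SPEC =====
def Spec_is_is_green (coord : Int × Int) (vertical_limits : List (Int × Int × Int)) (horizontal_limits : List (Int × Int × Int)) (out : Bool) : Prop := out = is_is_green_alt coord vertical_limits horizontal_limits
instance (coord : Int × Int) (vertical_limits : List (Int × Int × Int)) (horizontal_limits : List (Int × Int × Int)) (out : Bool) : Decidable (Spec_is_is_green coord vertical_limits horizontal_limits out) := by unfold Spec_is_is_green; infer_instance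

-- ===== CLAIM (what is proved, stated in full; the proofs are below) =====
def Claim_equal_is_is_green : Prop := ∀ (coord : Int × Int) (vertical_limits : List (Int × Int × Int)) (horizontal_limits : List (Int × Int × Int)), Dom_is_is_green coord vertical_limits horizontal_limits → Spec_is_is_green coord vertical_limits horizontal_limits (is_is_green coord vertical_limits horizontal_limits)

-- ===== LEMMAS AND PROOFS =====

-- `o` (a dict lookup result) covers the point `p`
def pvCov (o : Option (Int × Int)) (p : Int) : Bool :=
  match o with
  | some ab => decide (ab.1 ≤ p ∧ p ≤ ab.2)
  | none => false

theorem is_green_eq (u p : Int) (vd hd : PySem.Dict Int (Int × Int)) :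
    is_green (u, p) vd hd = (pvCov (vd.get? u) p || pvCov (hd.get? p) u) := by
  cases hv : vd.get? u <;> cases hh : hd.get? p <;>
    simp [is_green, pvCov, hv, hh]

theorem pvMinPair_map_snd (c : Int) (p0 : Int) (L : List Int) :
    pvMinPair (c, p0) (L.map (fun p => (c, p))) = (c, L.foldl min p0) := by
  induction L generalizing p0 with
  | nil => rfl
  | cons a L ih =>
    simp only [List.map, pvMinPair, List.foldl] at *
    by_cases h : a < p0
    · rw [if_pos (by simp [pvLexLt, h]), show min p0 a = a by omega]; exact ih a
    · rw [if_neg (by simp [pvLexLt]; omega), show min p0 a = p0 by omega]; exact ih p0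

theorem pvMaxPair_map_snd (c : Int) (p0 : Int) (L : List Int) :
    pvMaxPair (c, p0) (L.map (fun p => (c, p))) = (c, L.foldl max p0) := by
  induction L generalizing p0 with
  | nil => rfl
  | cons a L ih =>
    simp only [List.map, pvMaxPair, List.foldl] at *
    by_cases h : p0 < a
    · rw [if_pos (by simp [pvLexLt, h]), show max p0 a = a by omega]; exact ih a
    · rw [if_neg (by simp [pvLexLt]; omega), show max p0 a = p0 by omega]; exact ih p0

theorem pvMinPair_map_fst (c : Int) (p0 : Int) (L : List Int) :
    pvMinPair (p0, c) (L.map (fun p => (p, c))) = (L.foldl min p0, c) := by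
  induction L generalizing p0 with
  | nil => rfl
  | cons a L ih =>
    simp only [List.map, pvMinPair, List.foldl] at *
    by_cases h : a < p0
    · rw [if_pos (by simp [pvLexLt, h]), show min p0 a = a by omega]; exact ih a
    · rw [if_neg (by simp [pvLexLt]; omega), show min p0 a = p0 by omega]; exact ih p0

theorem pvMaxPair_map_fst (c : Int) (p0 : Int) (L : List Int) :
    pvMaxPair (p0, c) (L.map (fun p => (p, c))) = (L.foldl max p0, c) := by
  induction L generalizing p0 with
  | nil => rfl
  | cons a L ih =>
    simp only [List.map, pvMaxPair, List.foldl] at *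
    by_cases h : p0 < a
    · rw [if_pos (by simp [pvLexLt, h]), show max p0 a = a by omega]; exact ih a
    · rw [if_neg (by simp [pvLexLt]; omega), show max p0 a = p0 by omega]; exact ih p0

theorem pvCond_iff (L : List Int) (t : Int) :
    pvCond L t = true ↔ ∃ p1 ∈ L, p1 ≤ t ∧ ∃ p2 ∈ L, t ≤ p2 := by
  cases L with
  | nil => simp [pvCond]
  | cons p r =>
    simp only [pvCond, decide_eq_true_iff]
    constructor
    · rintro ⟨h1, h2⟩
      refine ⟨r.foldl min p, ?_, h1, r.foldl max p, ?_, h2⟩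
      · rcases PySem.List.foldl_min_mem r p with h | h
        · rw [h]; exact List.mem_cons_self
        · exact List.mem_cons_of_mem _ h
      · rcases PySem.List.foldl_max_mem r p with h | h
        · rw [h]; exact List.mem_cons_self
        · exact List.mem_cons_of_mem _ h
    · rintro ⟨p1, hp1, hle, p2, hp2, hge⟩
      constructor
      · rcases List.mem_cons.1 hp1 with h | h
        · exact le_trans (h ▸ (PySem.List.foldl_min_le r p).1) hle
        · exact le_trans ((PySem.List.foldl_min_le r p).2 p1 h) hle
      · rcases List.mem_cons.1 hp2 with h | h
        · exact le_trans hge (h ▸ (PySem.List.le_foldl_max r p).1)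
        · exact le_trans hge ((PySem.List.le_foldl_max r p).2 p2 h)

theorem pvCond_eq_of (L M : List Int) (t : Int)
    (hML : ∀ q ∈ M, q ∈ L)
    (hLM : ∀ p ∈ L, ∃ q1 ∈ M, q1 ≤ p ∧ ∃ q2 ∈ M, p ≤ q2) :
    pvCond L t = pvCond M t := by
  rw [Bool.eq_iff_iff, pvCond_iff, pvCond_iff]
  constructor
  · rintro ⟨p1, hp1, hle, p2, hp2, hge⟩
    obtain ⟨q1, hq1, hq1le, -⟩ := hLM p1 hp1
    obtain ⟨-, -, -, q2, hq2, hq2ge⟩ := hLM p2 hp2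
    exact ⟨q1, hq1, le_trans hq1le hle, q2, hq2, le_trans hge hq2ge⟩
  · rintro ⟨p1, hp1, hle, p2, hp2, hge⟩
    exact ⟨p1, hML p1 hp1, hle, p2, hML p2 hp2, hge⟩

theorem pv_mem_itemsPart (dK : PySem.Dict Int (Int × Int)) (hnd : dK.keys.Nodup)
    (u lo hi q : Int) :
    (q ∈ (dK.items.filter (fun it => decide (lo ≤ it.1 ∧ it.1 ≤ hi ∧ it.2.1 ≤ u ∧ u ≤ it.2.2))).map (fun it => it.1))
      ↔ (lo ≤ q ∧ q ≤ hi) ∧ pvCov (dK.get? q) u = true := by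
  simp only [List.mem_map, List.mem_filter, decide_eq_true_iff]
  constructor
  · rintro ⟨it, ⟨hmem, h1, h2, h3, h4⟩, rfl⟩
    have hget : dK.get? it.1 = some it.2 := PySem.Dict.get?_of_mem_items dK hmem hnd
    exact ⟨⟨h1, h2⟩, by simp [pvCov, hget]; exact ⟨h3, h4⟩⟩
  · rintro ⟨⟨h1, h2⟩, hcov⟩
    cases hget : dK.get? q with
    | none => rw [hget] at hcov; simp [pvCov] at hcov
    | some ab =>
      rw [hget] at hcov
      simp only [pvCov, decide_eq_true_iff] at hcov
      exact ⟨(q, ab), ⟨PySem.Dict.mem_items_of_get?_eq_some dK hget, h1, h2, hcov.1, hcov.2⟩, rfl⟩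

-- The heart of the equivalence: scanning the whole coordinate range for green points and taking
-- min/max gives the same test as collecting only the clipped interval endpoints and qualifying keys.
theorem pvMain (dK : PySem.Dict Int (Int × Int)) (hnd : dK.keys.Nodup)
    (oF : Option (Int × Int)) (u t lo hi : Int) :
    pvCond ((PySem.List.pyRange lo (hi + 1)).filter (fun p => pvCov oF p || pvCov (dK.get? p) u)) t
    = pvCond (pvClip oF lo hi ++ (dK.items.filter (fun it => decide (lo ≤ it.1 ∧ it.1 ≤ hi ∧ it.2.1 ≤ u ∧ u ≤ it.2.2))).map (fun it => it.1)) t := by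
  apply pvCond_eq_of
  · intro q hq
    rw [List.mem_append] at hq
    rw [List.mem_filter, PySem.List.mem_pyRange_one, Bool.or_eq_true]
    rcases hq with hq | hq
    · cases oF with
      | none => simp [pvClip] at hq
      | some ab =>
        by_cases hcl : max ab.1 lo ≤ min ab.2 hi
        · simp only [pvClip, hcl, if_pos, List.mem_cons, List.not_mem_nil, or_false] at hq
          rcases hq with rfl | rfl
          · exact ⟨⟨le_max_right _ _, by omega⟩, Or.inl (by simp [pvCov]; omega)⟩
          · exact ⟨⟨by omega, by omega⟩, Or.inl (by simp [pvCov]; omega)⟩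
        · simp [pvClip, hcl] at hq
    · rw [pv_mem_itemsPart dK hnd] at hq
      exact ⟨⟨hq.1.1, by omega⟩, Or.inr hq.2⟩
  · intro p hp
    rw [List.mem_filter, PySem.List.mem_pyRange_one, Bool.or_eq_true] at hp
    obtain ⟨⟨hlo, hhi⟩, hgreen⟩ := hp
    rcases hgreen with hv | hh
    · cases oF with
      | none => simp [pvCov] at hv
      | some ab =>
        simp only [pvCov, decide_eq_true_iff] at hv
        obtain ⟨ha, hb⟩ := hv
        have hcl : max ab.1 lo ≤ min ab.2 hi := by omega
        refine ⟨max ab.1 lo, ?_, by omega, min ab.2 hi, ?_, by omega⟩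
        · simp [pvClip, hcl]
        · simp [pvClip, hcl]
    · refine ⟨p, ?_, le_refl p, p, ?_, le_refl p⟩ <;>
        · rw [List.mem_append, pv_mem_itemsPart dK hnd]
          exact Or.inr ⟨⟨hlo, by omega⟩, hh⟩

-- A's match over the list of green PAIRS equals pvCond on the underlying points
theorem pvMatch_snd (x y : Int) (F : List Int) :
    pvSpanCheck (F.map (fun p => (x, p))) (fun g => g.2) y = pvCond F y := by
  cases F with
  | nil => rfl
  | cons f r => simp [pvSpanCheck, pvCond, pvMinPair_map_snd, pvMaxPair_map_snd]

theorem pvMatch_fst (y x : Int) (F : List Int) :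
    pvSpanCheck (F.map (fun p => (p, y))) (fun g => g.1) x = pvCond F x := by
  cases F with
  | nil => rfl
  | cons f r => simp [pvSpanCheck, pvCond, pvMinPair_map_fst, pvMaxPair_map_fst]

-- ===== VERDICT (by name: the statement is the Claim_ definition above) =====
theorem is_is_green_spec : Claim_equal_is_is_green := by
  intro coord vl hl _hdom
  unfold Spec_is_is_green
  simp only [is_is_green, is_is_green_alt]
  rw [PySem.List.foldl_append_if, PySem.List.foldl_append_if, PySem.List.foldl_append_if,
      PySem.List.foldl_append_if]
  simp only [List.nil_append, List.map_id', List.filter_map, Function.comp_def, is_green_eq]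
  rw [pvMatch_snd, pvMatch_fst]
  rw [List.filter_congr (fun p _ => Bool.or_comm (pvCov ((PySem.Dict.ofList vl).get? p) coord.2)
        (pvCov ((PySem.Dict.ofList hl).get? coord.2) p))]
  rw [pvMain (PySem.Dict.ofList hl) (PySem.Dict.nodup_keys_ofList hl),
      pvMain (PySem.Dict.ofList vl) (PySem.Dict.nodup_keys_ofList vl)]
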